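-- pv_equiv track=rewrite | github.com/pypi-data/pypi-mirror-76 | packages/note-shell/note_shell-1.5.2-py3-none-any.whl/note/helpers.py | format_for_tabulate
-- ===== SOURCE A (Python) =====
-- from functools import reduce
-- from collections import OrderedDict
--
-- def type_check(element, target_types: list or tuple, default=None) -> any:
--     """
--     Unbound Function to match an object to desired types, and return a default if unmatched
--     """
--     def object_isinstance(obj, types: list or tuple):
--         """ Check if object belongs to a list of types """
--         return reduce(
--             lambda x, y: x or y,
--             [isinstance(obj, type_) for type_ in types]
--         )
--
--     target_types = target_types if object_isinstance(target_types, (list, tuple)) else [target_types]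
--
--     return element if object_isinstance(element, target_types) else default
--
-- def order_obj_for_tabulate(table, order):
--     """
--     Prepare object in ordered format of keys for tabulate library
--     """
--     ordered_table = []
--
--     for row in table:
--         ordered_row = OrderedDict()
--
--         for key in order:
--             if key in row:
--                 ordered_row[key] = row[key]
--
--         ordered_table.append(ordered_row)
--
--     return ordered_table
--
-- def format_for_tabulate(table_obj, filters):
--     """
--     Format an object for tabulate library, selecting 'filters' as keys from the object
--     """
--     table_obj = type_check(table_obj, (list, tuple), default=())
--
--     table_obj = order_obj_for_tabulate(table_obj, filters)
--
--     return [
--         list(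
--             map(
--                 lambda kv: kv[1] if len(kv[1]) < 51 else ''.join([kv[1][:47], '...']),
--                 filter(
--                     lambda kv: kv[0] in filters,
--                     [kv for kv in row.items()]
--             ))) for row in table_obj
--     ]
-- ===== SOURCE B (Python) =====
-- def format_for_tabulate(table_obj, filters):
--     """
--     Format an object for tabulate library, selecting 'filters' as keys from the object
--     """
--     if not isinstance(table_obj, (list, tuple)):
--         table_obj = ()
--     result = []
--     for row in table_obj:
--         seen = set()
--         out = []
--         for key in filters:
--             if key in row and key not in seen:
--                 seen.add(key)
--                 value = row[key]
--                 out.append(value if len(value) < 51 else value[:47] + '...')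
--         result.append(out)
--     return result
-- ===== Notes on version B (the rewrite author's own statement) =====
-- stated objective: faster
-- what changed: One direct pass driven by the filter keys with a seen-set for dedup, looking each key up in the row, instead of building an OrderedDict per row and then re-scanning its items with an O(|filters|) 'in filters' list-membership test per item.
import Mathlib
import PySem

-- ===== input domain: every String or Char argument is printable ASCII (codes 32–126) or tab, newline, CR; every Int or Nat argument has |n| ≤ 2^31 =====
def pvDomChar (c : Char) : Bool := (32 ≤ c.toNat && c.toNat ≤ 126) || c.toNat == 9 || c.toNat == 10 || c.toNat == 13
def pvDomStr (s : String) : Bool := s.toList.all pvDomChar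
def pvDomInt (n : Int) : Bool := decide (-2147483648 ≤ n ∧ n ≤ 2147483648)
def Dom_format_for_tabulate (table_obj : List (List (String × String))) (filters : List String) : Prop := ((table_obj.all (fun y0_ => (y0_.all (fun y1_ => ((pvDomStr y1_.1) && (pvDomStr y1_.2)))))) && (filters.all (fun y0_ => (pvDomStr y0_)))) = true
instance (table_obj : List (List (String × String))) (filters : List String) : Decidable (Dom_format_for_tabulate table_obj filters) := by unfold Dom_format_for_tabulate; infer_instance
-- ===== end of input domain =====

-- B replaces A's per-row OrderedDict + items/filter/map pipeline (with its inner 'in filters'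
-- list scan per item) by a single pass over the filter keys with a seen-set (objective: faster).


-- ===== PORT A =====
-- a row (a Python dict) is an association list; 'key in row' / 'row[key]' via PySem.Dict lookup
def rowDict (row : List (String × String)) : PySem.Dict String String := PySem.Dict.mk row

-- order_obj_for_tabulate: per row, 'for key in order: if key in row: ordered_row[key] = row[key]'
def order_obj_for_tabulate (table : List (List (String × String))) (order : List String) :
    List (PySem.Dict String String) :=
  table.map (fun row =>
    order.foldl (fun d key =>
      match (rowDict row).get? key with
      | some v => d.insert key v
      | none => d) PySem.Dict.empty)

-- the lambda 'kv[1] if len(kv[1]) < 51 else "".join([kv[1][:47], "..."])'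
def truncA (v : String) : String :=
  if PySem.Str.len v < 51 then v
  else PySem.Str.join "" [PySem.Str.slice v none (some 47), "..."]

def format_for_tabulate (table_obj : List (List (String × String))) (filters : List String) : List (List String) :=
  -- type_check(table_obj, (list, tuple), default=()) : table_obj is always a list here, so it passes unchanged
  let ordered := order_obj_for_tabulate table_obj filters
  ordered.map (fun row =>
    ((row.items.filter (fun kv => filters.contains kv.1)).map (fun kv => truncA kv.2)))

-- ===== PORT B =====
-- 'value if len(value) < 51 else value[:47] + "..."'
def truncB (v : String) : String :=
  if PySem.Str.len v < 51 then v
  else PySem.Str.slice v none (some 47) ++ "..."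

def format_for_tabulate_alt (table_obj : List (List (String × String))) (filters : List String) : List (List String) :=
  table_obj.map (fun row =>
    (filters.foldl (fun (acc : PySem.Set String × List String) key =>
      match (rowDict row).get? key with
      | some v =>
          if PySem.Set.contains acc.1 key then acc
          else (PySem.Set.add acc.1 key, acc.2 ++ [truncB v])
      | none => acc) (PySem.Set.empty, [])).2)

-- ===== PRECONDITION & SPEC =====
def Spec_format_for_tabulate (table_obj : List (List (String × String))) (filters : List String) (out : List (List String)) : Prop := out = format_for_tabulate_alt table_obj filters
instance (table_obj : List (List (String × String))) (filters : List String) (out : List (List String)) : Decidable (Spec_format_for_tabulate table_obj filters out) := by unfold Spec_format_for_tabulate; infer_instance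

-- ===== CLAIM (what is proved, stated in full; the proofs are below) =====
def Claim_equal_format_for_tabulate : Prop := ∀ (table_obj : List (List (String × String))) (filters : List String), Dom_format_for_tabulate table_obj filters → Spec_format_for_tabulate table_obj filters (format_for_tabulate table_obj filters)

-- ===== LEMMAS AND PROOFS =====

-- the two truncation lambdas compute the same string
theorem truncB_eq_truncA : truncB = truncA := by
  funext v
  unfold truncA truncB
  split
  · rfl
  · simp [PySem.Str.join, PySem.Str.slice, PySem.Chars.join_cons_cons, PySem.Chars.join_singleton]

-- re-inserting a key with the value it already holds leaves the dict unchanged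
theorem insert_self_eq (d : PySem.Dict String String) (k : String) (v : String)
    (hnd : d.keys.Nodup) (h : d.get? k = some v) : d.insert k v = d := by
  apply PySem.Dict.ext
  rw [PySem.Dict.items_insert_of_contains]
  · conv_rhs => rw [← List.map_id d.items]
    apply List.map_congr_left
    rintro ⟨p1, p2⟩ hp
    by_cases hk : p1 = k
    · subst hk
      have hg := PySem.Dict.get?_of_mem_items d hp hnd
      rw [h] at hg
      simp_all
    · simp [hk]
  · simp [PySem.Dict.contains_eq_isSome_get?, h]

-- B's seen-set/output pair tracks the keys and the mapped items of A's growing OrderedDict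
theorem loop_invariant (row : List (String × String)) (tb : String → String)
    (fs : List String) (d : PySem.Dict String String)
    (hnd : d.keys.Nodup)
    (hrow : ∀ p ∈ d.items, (rowDict row).get? p.1 = some p.2) :
    (fs.foldl (fun (acc : PySem.Set String × List String) key =>
      match (rowDict row).get? key with
      | some v =>
          if PySem.Set.contains acc.1 key then acc
          else (PySem.Set.add acc.1 key, acc.2 ++ [tb v])
      | none => acc) (d.keys, d.items.map (fun kv => tb kv.2))).2
    = ((fs.foldl (fun d key =>
      match (rowDict row).get? key with
      | some v => d.insert key v
      | none => d) d).items).map (fun kv => tb kv.2) := by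
  induction fs generalizing d with
  | nil => simp
  | cons key rest ih =>
    simp only [List.foldl_cons]
    cases hg : (rowDict row).get? key with
    | none => exact ih d hnd hrow
    | some v =>
      dsimp only
      by_cases hc : key ∈ d.keys
      · have hcont : PySem.Set.contains d.keys key = true := by
          rw [PySem.Set.contains_iff]; exact hc
        have hdc : d.contains key = true := (PySem.Dict.contains_iff_mem_keys d key).mpr hc
        have hdg : d.get? key = some v := by
          rcases Option.isSome_iff_exists.mp
            (by rw [← PySem.Dict.contains_eq_isSome_get? d key]; exact hdc) with ⟨w, hw⟩
          have : (key, w) ∈ d.items := PySem.Dict.mem_items_of_get?_eq_some d hw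
          have := hrow _ this
          rw [hg] at this
          rw [hw]; simpa using this.symm
        rw [insert_self_eq d key v hnd hdg]
        simp only [hcont, if_true]
        exact ih d hnd hrow
      · have hcont : PySem.Set.contains d.keys key = false := by
          rw [← Bool.not_eq_true, PySem.Set.contains_iff]; exact hc
        have hdc : d.contains key = false := by
          rw [← Bool.not_eq_true, PySem.Dict.contains_iff_mem_keys]; exact hc
        simp only [hcont, Bool.false_eq_true, if_false]
        have hkeys : (d.insert key v).keys = d.keys ++ [key] :=
          PySem.Dict.keys_insert_of_not_contains d v hdc
        have hitems : (d.insert key v).items = d.items ++ [(key, v)] :=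
          PySem.Dict.items_insert_of_not_contains d v hdc
        have hadd : PySem.Set.add d.keys key = d.keys ++ [key] :=
          PySem.Set.add_of_not_mem hc
        have hnd' : (d.insert key v).keys.Nodup := PySem.Dict.nodup_keys_insert d key v hnd
        have hrow' : ∀ p ∈ (d.insert key v).items, (rowDict row).get? p.1 = some p.2 := by
          intro p hp
          rw [hitems] at hp
          rcases List.mem_append.mp hp with h | h
          · exact hrow p h
          · simp at h; subst h; simpa using hg
        have := ih (d.insert key v) hnd' hrow'
        rw [hitems] at this
        simp only [List.map_append, List.map_cons, List.map_nil] at this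
        rw [hadd, ← hkeys]
        exact this

-- every key of A's per-row dict was drawn from the filter list
theorem keys_sub (row : List (String × String)) (fs : List String) (d : PySem.Dict String String)
    (F : List String) (hfs : ∀ k ∈ fs, k ∈ F) (hd : ∀ p ∈ d.items, p.1 ∈ F) :
    ∀ p ∈ (fs.foldl (fun d key =>
      match (rowDict row).get? key with
      | some v => d.insert key v
      | none => d) d).items, p.1 ∈ F := by
  induction fs generalizing d with
  | nil => intro p hp; exact hd p hp
  | cons key rest ih =>
    simp only [List.foldl_cons]
    cases hg : (rowDict row).get? key with
    | none => exact ih d (fun k hk => hfs k (List.mem_cons_of_mem _ hk)) hd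
    | some v =>
      apply ih _ (fun k hk => hfs k (List.mem_cons_of_mem _ hk))
      intro p hp
      rcases (PySem.Dict.mem_items_insert d key v p).mp hp with h | h
      · subst h; exact hfs key List.mem_cons_self
      · exact hd p h.1

-- ===== VERDICT (by name: the statement is the Claim_ definition above) =====
theorem format_for_tabulate_spec : Claim_equal_format_for_tabulate := by
  intro table_obj filters _
  unfold Spec_format_for_tabulate format_for_tabulate format_for_tabulate_alt
    order_obj_for_tabulate
  rw [truncB_eq_truncA]
  simp only [List.map_map]
  apply List.map_congr_left
  intro row _
  have hsub := keys_sub row filters PySem.Dict.empty filters (fun _ hk => hk)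
    (by intro p hp; simp [PySem.Dict.empty] at hp)
  have hfilt : ((filters.foldl (fun d key =>
      match (rowDict row).get? key with
      | some v => d.insert key v
      | none => d) PySem.Dict.empty).items).filter (fun kv => filters.contains kv.1)
      = ((filters.foldl (fun d key =>
      match (rowDict row).get? key with
      | some v => d.insert key v
      | none => d) PySem.Dict.empty).items) := by
    apply List.filter_eq_self.mpr
    intro p hp
    simpa using hsub p hp
  have hinv := loop_invariant row truncA filters PySem.Dict.empty
    PySem.Dict.nodup_keys_empty (by intro p hp; simp [PySem.Dict.empty] at hp)
  simp only [Function.comp, hfilt]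
  rw [← hinv]
  rfl
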